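-- pv_equiv track=rewrite | github.com/5iri/ProsperityHDL | tb/test_pruner.py | analyse_reuse
-- ===== SOURCE A (Python) =====
-- def popcount(x) -> int:
--     return bin(x).count("1")
--
-- def analyse_reuse(rows):
--     reuse = 0
--     for idx, row in enumerate(rows):
--         NO_row = popcount(row)
--         for p_idx, prefix in enumerate(rows):
--             if p_idx == idx: continue
--             NO_p = popcount(prefix)
--             if (prefix & row) == prefix and NO_p < NO_row: reuse += 1; break
--             if prefix == row and p_idx < idx: reuse += 1; break
--     return reuse
-- ===== SOURCE B (Python) =====
-- def analyse_reuse(rows):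
--     cnt = {}
--     for r in rows:
--         cnt[r] = cnt.get(r, 0) + 1
--     total = 0
--     for v, c in cnt.items():
--         pv = bin(v).count("1")
--         if any(bin(u).count("1") < pv and (u & v) == u for u in cnt):
--             total += c
--         else:
--             total += c - 1
--     return total
-- ===== Notes on version B (the rewrite author's own statement) =====
-- stated objective: alternative
-- what changed: Instead of scanning per index, B builds a counter of row values once and iterates over the distinct values: a value with a proper masked subset contributes its full multiplicity, otherwise multiplicity minus one (only the first occurrence lacks an earlier duplicate), so the per-row duplicate/break logic disappears.
import Mathlib
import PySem

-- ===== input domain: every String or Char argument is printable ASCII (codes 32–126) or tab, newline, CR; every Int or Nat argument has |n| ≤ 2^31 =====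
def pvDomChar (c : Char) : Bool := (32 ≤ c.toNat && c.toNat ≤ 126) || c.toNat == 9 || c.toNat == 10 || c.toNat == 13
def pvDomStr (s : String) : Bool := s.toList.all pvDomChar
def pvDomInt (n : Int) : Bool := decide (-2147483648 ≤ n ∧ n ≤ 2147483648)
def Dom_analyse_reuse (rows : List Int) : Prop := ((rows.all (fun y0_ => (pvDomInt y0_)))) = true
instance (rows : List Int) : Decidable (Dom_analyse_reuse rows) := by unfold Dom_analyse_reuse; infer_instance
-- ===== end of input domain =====

-- B replaces A's per-index nested scan by a value counter: each distinct value contributes its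
-- multiplicity (minus one when it has no proper masked subset); same result, different aggregation.

-- ===== PORT A =====
-- popcount x = bin(x).count("1") = number of 1 bits of |x|; PySem.Int.bitCount is exact here (reads |x|, incl. negatives)
def popcountA (x : Int) : Int := PySem.Int.bitCount x

-- A's inner 'for p_idx, prefix in enumerate(rows)' loop, break conditions in source order;
-- returns the increment to reuse (a break = return 1, falling through = return 0)
def innerA (idx noRow row : Int) : List (Int × Int) → Int
  | [] => 0
  | (pIdx, p) :: rest =>
    if pIdx = idx then innerA idx noRow row rest
    else
      let noP := popcountA p
      if PySem.Int.band p row = p ∧ noP < noRow then 1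
      else if p = row ∧ pIdx < idx then 1
      else innerA idx noRow row rest

def analyse_reuse (rows : List Int) : Int :=
  (PySem.List.enumerate rows 0).foldl
    (fun reuse ir => reuse + innerA ir.1 (popcountA ir.2) ir.2 (PySem.List.enumerate rows 0)) 0

-- ===== PORT B =====
-- cnt = {}; for r in rows: cnt[r] = cnt.get(r, 0) + 1
def buildCntB (rows : List Int) : PySem.Dict Int Int :=
  rows.foldl (fun d r => d.insert r (d.getD r 0 + 1)) PySem.Dict.empty

-- any(bin(u).count("1") < pv and (u & v) == u for u in cnt)   — 'for u in cnt' iterates the keys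
def hasSubB (keys : List Int) (pv : Nat) (v : Int) : Bool :=
  keys.any (fun u => decide (PySem.Int.bitCount u < pv) && (PySem.Int.band u v == u))

def analyse_reuse_alt (rows : List Int) : Int :=
  let cnt := buildCntB rows
  cnt.items.foldl (fun total vc =>
    let pv := PySem.Int.bitCount vc.1
    if hasSubB cnt.keys pv vc.1 then total + vc.2 else total + vc.2 - 1) 0

-- ===== PRECONDITION & SPEC =====
def Spec_analyse_reuse (rows : List Int) (out : Int) : Prop := out = analyse_reuse_alt rows
instance (rows : List Int) (out : Int) : Decidable (Spec_analyse_reuse rows out) := by unfold Spec_analyse_reuse; infer_instance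

-- ===== CLAIM (what is proved, stated in full; the proofs are below) =====
def Claim_equal_analyse_reuse : Prop := ∀ (rows : List Int), Dom_analyse_reuse rows → Spec_analyse_reuse rows (analyse_reuse rows)

-- ===== LEMMAS AND PROOFS =====

-- value v has a proper masked subset among the values of rows (index-free reformulation)
def subB (rows : List Int) (v : Int) : Bool :=
  rows.any (fun u => decide (PySem.Int.bitCount u < PySem.Int.bitCount v) && (PySem.Int.band u v == u))

-- A's per-row increment, re-expressed over the growing set of already-seen values
def Cfun (rows : List Int) (seen : PySem.Set Int) : List Int → Int
  | [] => 0
  | x :: t => (if (x ∈ seen ∨ subB rows x = true) then 1 else 0) + Cfun rows (PySem.Set.add seen x) t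

-- the complementary count: first occurrences without a proper masked subset
def Dfun (rows : List Int) (seen : PySem.Set Int) : List Int → Int
  | [] => 0
  | x :: t => (if (x ∉ seen ∧ subB rows x = false) then 1 else 0) + Dfun rows (PySem.Set.add seen x) t

-- the break condition of A's inner loop for one candidate pair jp = (p_idx, prefix)
abbrev Pinner (idx noRow row : Int) (jp : Int × Int) : Prop :=
  jp.1 ≠ idx ∧ ((PySem.Int.band jp.2 row = jp.2 ∧ popcountA jp.2 < noRow) ∨ (jp.2 = row ∧ jp.1 < idx))

-- A's break-on-first-hit inner loop is a pure existence test
theorem innerA_eq_any (idx noRow row : Int) (l : List (Int × Int)) :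
    innerA idx noRow row l = (if (∃ jp ∈ l, Pinner idx noRow row jp) then 1 else 0) := by
  induction l with
  | nil => simp [innerA]
  | cons hd tl ih =>
    obtain ⟨pIdx, p⟩ := hd
    have hcons := List.exists_mem_cons_iff (Pinner idx noRow row) (pIdx, p) tl
    by_cases hC : ∃ jp ∈ tl, Pinner idx noRow row jp
    · rw [if_pos (hcons.mpr (Or.inr hC))]
      simp only [innerA]
      split_ifs with h1 h2 h3
      · rw [ih, if_pos hC]
      · rfl
      · rfl
      · rw [ih, if_pos hC]
    · by_cases hP : Pinner idx noRow row (pIdx, p)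
      · rw [if_pos (hcons.mpr (Or.inl hP))]
        obtain ⟨hne, hor⟩ := hP
        simp only [innerA]
        split_ifs with h1 h2 h3
        · exact absurd h1 hne
        · rfl
        · rfl
        · rcases hor with h | h
          · exact absurd h h2
          · exact absurd h h3
      · rw [if_neg (fun hx => (hcons.mp hx).elim hP hC)]
        simp only [innerA]
        split_ifs with h1 h2 h3
        · rw [ih, if_neg hC]
        · exact absurd ⟨h1, Or.inl h2⟩ hP
        · exact absurd ⟨h1, Or.inr h3⟩ hP
        · rw [ih, if_neg hC]

-- on row number pre.length, A's inner-loop increment is 'earlier duplicate or proper masked subset'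
theorem incr_eq (pre : List Int) (x : Int) (suf : List Int) :
    innerA (pre.length : Int) (popcountA x) x (PySem.List.enumerate (pre ++ x :: suf) 0)
    = (if (x ∈ pre ∨ subB (pre ++ x :: suf) x = true) then 1 else 0) := by
  rw [innerA_eq_any]
  apply if_congr _ rfl rfl
  simp only [subB, List.any_eq_true, Bool.and_eq_true, beq_iff_eq, decide_eq_true_eq, Pinner]
  constructor
  · rintro ⟨jp, hmem, hne, hcond⟩
    rcases hcond with ⟨hband, hpc⟩ | ⟨heq, hlt⟩
    · right
      rw [PySem.List.mem_enumerate_iff] at hmem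
      obtain ⟨k, hk, hjp⟩ := hmem
      subst hjp
      refine ⟨(pre ++ x :: suf)[k], List.getElem_mem hk, ?_, hband⟩
      simp only [popcountA] at hpc
      exact_mod_cast hpc
    · left
      rw [PySem.List.mem_enumerate_iff] at hmem
      obtain ⟨k, hk, hjp⟩ := hmem
      subst hjp
      simp only at heq hlt
      have hklt : k < pre.length := by
        have : (0 : Int) + k < pre.length := hlt
        omega
      have hg : (pre ++ x :: suf)[k] = pre[k] := List.getElem_append_left hklt
      rw [hg] at heq
      rw [← heq]
      exact List.getElem_mem hklt
  · rintro (hx | ⟨u, hu, hpc, hband⟩)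
    · obtain ⟨k, hklt, hpk⟩ := List.mem_iff_getElem.mp hx
      have hk : k < (pre ++ x :: suf).length := by simp; omega
      refine ⟨((0 : Int) + k, (pre ++ x :: suf)[k]),
        (PySem.List.mem_enumerate_iff _ _ _).mpr ⟨k, hk, rfl⟩, ?_, Or.inr ⟨?_, ?_⟩⟩
      · simp only; omega
      · simp only
        rw [List.getElem_append_left hklt, hpk]
      · simp only; omega
    · obtain ⟨k, hklt, huk⟩ := List.mem_iff_getElem.mp hu
      have hne : ((0 : Int) + k) ≠ (pre.length : Int) := by
        intro h
        have hkeq : k = pre.length := by omega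
        have hgx : (pre ++ x :: suf)[k] = x := by
          subst hkeq
          rw [List.getElem_append_right (le_refl pre.length)]
          simp
        rw [hgx] at huk
        subst huk
        exact absurd hpc (lt_irrefl _)
      refine ⟨((0 : Int) + k, (pre ++ x :: suf)[k]),
        (PySem.List.mem_enumerate_iff _ _ _).mpr ⟨k, hklt, rfl⟩, hne, Or.inl ⟨?_, ?_⟩⟩
      · simp only
        rw [huk, hband]
      · simp only
        rw [huk]
        simp only [popcountA]
        exact_mod_cast hpc

-- A's outer fold computes Cfun over the suffix, with the seen-set = values of the prefix
theorem A_fold (rows : List Int) :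
    ∀ (suf pre : List Int) (b : Int), rows = pre ++ suf →
      (PySem.List.enumerate suf (pre.length)).foldl
        (fun reuse ir => reuse + innerA ir.1 (popcountA ir.2) ir.2 (PySem.List.enumerate rows 0)) b
      = b + Cfun rows (PySem.Set.ofList pre) suf := by
  intro suf
  induction suf with
  | nil => intro pre b _; simp [PySem.List.enumerate_nil, Cfun]
  | cons x t ih =>
    intro pre b hrows
    rw [PySem.List.enumerate_cons, List.foldl_cons]
    have hlen : ((pre.length : Int) + 1) = ((pre ++ [x]).length : Int) := by simp
    rw [hlen, ih (pre ++ [x]) _ (by simp [hrows])]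
    have hincr : innerA (pre.length : Int) (popcountA x) x (PySem.List.enumerate rows 0)
        = (if (x ∈ PySem.Set.ofList pre ∨ subB rows x = true) then 1 else 0) := by
      rw [hrows, incr_eq]
      apply if_congr _ rfl rfl
      rw [PySem.Set.mem_ofList]
    rw [hincr]
    show b + _ + Cfun rows (PySem.Set.ofList (pre ++ [x])) t = _
    rw [PySem.Set.ofList_append_singleton]
    simp only [Cfun]
    omega

-- every element contributes 1 to exactly one of Cfun, Dfun
theorem CD (rows : List Int) :
    ∀ (suf : List Int) (seen : PySem.Set Int),
      Cfun rows seen suf + Dfun rows seen suf = (suf.length : Int) := by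
  intro suf
  induction suf with
  | nil => intro seen; simp [Cfun, Dfun]
  | cons x t ih =>
    intro seen
    have h := ih (PySem.Set.add seen x)
    by_cases hx : x ∈ seen ∨ subB rows x = true
    · have hneg : ¬ (x ∉ seen ∧ subB rows x = false) := by
        rcases hx with h1 | h1
        · exact fun h2 => h2.1 h1
        · exact fun h2 => by rw [h1] at h2; exact absurd h2.2 (by simp)
      simp only [Cfun, Dfun, if_pos hx, if_neg hneg, List.length_cons]
      push_cast
      omega
    · have hpos : x ∉ seen ∧ subB rows x = false := by
        push Not at hx
        exact ⟨hx.1, by simpa using hx.2⟩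
      simp only [Cfun, Dfun, if_neg hx, if_pos hpos, List.length_cons]
      push_cast
      omega

-- Set.update only appends: the start set is a prefix of the result
theorem prefix_update : ∀ (l s : List Int), s <+: PySem.Set.update s l := by
  intro l
  induction l with
  | nil => intro s; exact List.prefix_refl s
  | cons x t ih =>
    intro s
    have h1 : s <+: PySem.Set.add s x := by
      simp only [PySem.Set.add]
      split_ifs
      · exact List.prefix_refl s
      · exact List.prefix_append s [x]
    exact h1.trans (ih (PySem.Set.add s x))

-- Dfun counts, among the values Set.update appends, those without a proper masked subset
theorem D_eq (rows : List Int) :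
    ∀ (suf : List Int) (seen : PySem.Set Int),
      Dfun rows seen suf
      = ((((PySem.Set.update seen suf).drop seen.length).countP (fun v => !subB rows v) : Nat) : Int) := by
  intro suf
  induction suf with
  | nil => intro seen; simp [Dfun, PySem.Set.update]
  | cons x t ih =>
    intro seen
    have hupd : PySem.Set.update seen (x :: t) = PySem.Set.update (PySem.Set.add seen x) t := rfl
    by_cases hx : x ∈ seen
    · have hc : PySem.Set.contains seen x = true := (PySem.Set.contains_iff seen x).mpr hx
      have hadd : PySem.Set.add seen x = seen := by simp [PySem.Set.add, hx]
      have hneg : ¬ (x ∉ seen ∧ subB rows x = false) := fun h => h.1 hx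
      simp only [Dfun, if_neg hneg, hupd, hadd]
      rw [ih seen]
      omega
    · have hc : PySem.Set.contains seen x = false := by
        rw [← Bool.not_eq_true, PySem.Set.contains_iff]
        exact hx
      have hadd : PySem.Set.add seen x = seen ++ [x] := by simp [PySem.Set.add, hx]
      obtain ⟨r, hr⟩ := prefix_update t (seen ++ [x])
      have hdrop1 : (PySem.Set.update (PySem.Set.add seen x) t).drop seen.length = x :: r := by
        rw [hadd, ← hr, List.append_assoc]
        rw [List.drop_left]
        rfl
      have hdrop2 : (PySem.Set.update (PySem.Set.add seen x) t).drop (PySem.Set.add seen x).length = r := by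
        rw [hadd, ← hr, List.drop_left]
      simp only [Dfun, hupd, hdrop1]
      rw [ih (PySem.Set.add seen x), hdrop2, List.countP_cons]
      by_cases hs : subB rows x = true
      · simp [hs]
      · have hs' : subB rows x = false := by simpa using hs
        rw [if_pos (show x ∉ seen ∧ subB rows x = false from ⟨hx, hs'⟩), hs']
        simp only [Bool.not_false, if_pos]
        push_cast
        omega

-- B's any() over the counter's keys = subB over the whole list (membership is the same)
theorem hasSub_eq (rows : List Int) (v : Int) :
    hasSubB (PySem.Set.ofList rows) (PySem.Int.bitCount v) v = subB rows v := by
  rw [Bool.eq_iff_iff]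
  simp only [hasSubB, subB, List.any_eq_true, Bool.and_eq_true, decide_eq_true_eq, beq_iff_eq]
  constructor
  · rintro ⟨u, hu, h⟩
    exact ⟨u, (PySem.Set.mem_ofList _ _).mp hu, h⟩
  · rintro ⟨u, hu, h⟩
    exact ⟨u, (PySem.Set.mem_ofList _ _).mpr hu, h⟩

-- B's fold over the counter items = total multiplicity minus the subset-free distinct values
theorem fold_items (rows : List Int) :
    ∀ (K : List Int) (b : Int),
      (K.map (fun k => (k, (rows.count k : Int)))).foldl
        (fun total vc => if subB rows vc.1 = true then total + vc.2 else total + vc.2 - 1) b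
      = b + (K.map (fun k => (rows.count k : Int))).sum - ((K.countP (fun v => !subB rows v) : Nat) : Int) := by
  intro K
  induction K with
  | nil => intro b; simp
  | cons k t ih =>
    intro b
    simp only [List.map_cons, List.foldl_cons, List.sum_cons, List.countP_cons]
    by_cases hs : subB rows k = true
    · rw [if_pos hs, ih]
      simp [hs]
      omega
    · have hs' : subB rows k = false := by simpa using hs
      rw [if_neg hs, ih]
      simp [hs']
      omega

-- the multiplicities over the distinct values sum to the length of the list
theorem sum_counts (rows : List Int) :
    ((PySem.Set.ofList rows).map (fun k => (rows.count k : Int))).sum = (rows.length : Int) := by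
  have hperm : (PySem.Set.ofList rows).Perm rows.dedup := by
    rw [List.perm_ext_iff_of_nodup (PySem.Set.nodup_ofList rows) rows.nodup_dedup]
    intro a
    rw [PySem.Set.mem_ofList, List.mem_dedup]
  rw [(hperm.map _).sum_eq]
  have h := List.sum_map_count_dedup_eq_length rows
  calc (rows.dedup.map fun k => (rows.count k : Int)).sum
      = (((rows.dedup.map fun k => rows.count k).sum : Nat) : Int) := by
        rw [Nat.cast_list_sum, List.map_map]
        rfl
    _ = (rows.length : Int) := by rw [h]

-- B in closed form: n minus the number of distinct values without a proper masked subset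
theorem B_closed (rows : List Int) :
    analyse_reuse_alt rows
    = (rows.length : Int) - (((PySem.Set.ofList rows).countP (fun v => !subB rows v) : Nat) : Int) := by
  show ((buildCntB rows).items.foldl _ 0) = _
  have hcnt : buildCntB rows = PySem.Dict.counter rows :=
    PySem.Dict.foldl_insert_getD_add_one_eq_counter rows
  rw [hcnt, PySem.Dict.items_counter, PySem.Dict.keys_counter]
  simp only [hasSub_eq]
  rw [fold_items, sum_counts]
  omega

-- ===== VERDICT (by name: the statement is the Claim_ definition above) =====
theorem analyse_reuse_spec : Claim_equal_analyse_reuse := by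
  intro rows _
  unfold Spec_analyse_reuse
  have hA : analyse_reuse rows = Cfun rows (PySem.Set.ofList []) rows := by
    have := A_fold rows rows [] 0 rfl
    simpa [analyse_reuse] using this
  have hupd0 : PySem.Set.update ([] : PySem.Set Int) rows = PySem.Set.ofList rows := rfl
  have hCD := CD rows rows (PySem.Set.ofList [])
  have hD := D_eq rows rows (PySem.Set.ofList [])
  rw [hA, B_closed]
  have hofnil : (PySem.Set.ofList ([] : List Int)) = ([] : List Int) := rfl
  rw [hofnil] at hCD hD ⊢
  rw [hupd0] at hD
  simp only [List.length_nil, List.drop_zero] at hD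
  omega
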